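-- pv_equiv track=rewrite | github.com/nyucel/blm2010 | 160401056.py | adegerler
-- ===== SOURCE A (Python) =====
-- def adegerler(length):
--     atoplam=[]
--     atoplam.append(length)
--     for j in range(1,13):
--         sonuc=0
--         for i in range(length):
--             sonuc += (i + 1) ** j
--         atoplam.append(sonuc)
--     return atoplam
-- ===== SOURCE B (Python) =====
-- # Closed-form power sums via Stirling numbers of the second kind:
-- # sum_{i=1}^{n} i^j = sum_k S2(j,k) * (n+1)*n*...*(n+1-k) // (k+1)   (O(1) per exponent)
-- _S2 = [
--     [(1, 1)],
--     [(1, 1), (2, 1)],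
--     [(1, 1), (2, 3), (3, 1)],
--     [(1, 1), (2, 7), (3, 6), (4, 1)],
--     [(1, 1), (2, 15), (3, 25), (4, 10), (5, 1)],
--     [(1, 1), (2, 31), (3, 90), (4, 65), (5, 15), (6, 1)],
--     [(1, 1), (2, 63), (3, 301), (4, 350), (5, 140), (6, 21), (7, 1)],
--     [(1, 1), (2, 127), (3, 966), (4, 1701), (5, 1050), (6, 266), (7, 28), (8, 1)],
--     [(1, 1), (2, 255), (3, 3025), (4, 7770), (5, 6951), (6, 2646), (7, 462), (8, 36), (9, 1)],
--     [(1, 1), (2, 511), (3, 9330), (4, 34105), (5, 42525), (6, 22827), (7, 5880), (8, 750), (9, 45), (10, 1)],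
--     [(1, 1), (2, 1023), (3, 28501), (4, 145750), (5, 246730), (6, 179487), (7, 63987), (8, 11880), (9, 1155), (10, 55), (11, 1)],
--     [(1, 1), (2, 2047), (3, 86526), (4, 611501), (5, 1379400), (6, 1323652), (7, 627396), (8, 159027), (9, 22275), (10, 1705), (11, 66), (12, 1)],
-- ]
--
-- def adegerler(length):
--     n = length if length > 0 else 0
--     x = n + 1
--     out = [length]
--     for row in _S2:
--         total = 0
--         for k, s in row:
--             p = 1
--             for t in range(k + 1):
--                 p *= x - t
--             total += s * (p // (k + 1))
--         out.append(total)
--     return out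
-- ===== Notes on version B (the rewrite author's own statement) =====
-- stated objective: faster
-- what changed: Replaced the O(length) summation loop per exponent by the exact Stirling-number closed form sum_{i<=n} i^j = sum_k S2(j,k)*fallingFactorial(n+1,k+1)//(k+1), evaluated in constant time per exponent from a fixed table.
import Mathlib
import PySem

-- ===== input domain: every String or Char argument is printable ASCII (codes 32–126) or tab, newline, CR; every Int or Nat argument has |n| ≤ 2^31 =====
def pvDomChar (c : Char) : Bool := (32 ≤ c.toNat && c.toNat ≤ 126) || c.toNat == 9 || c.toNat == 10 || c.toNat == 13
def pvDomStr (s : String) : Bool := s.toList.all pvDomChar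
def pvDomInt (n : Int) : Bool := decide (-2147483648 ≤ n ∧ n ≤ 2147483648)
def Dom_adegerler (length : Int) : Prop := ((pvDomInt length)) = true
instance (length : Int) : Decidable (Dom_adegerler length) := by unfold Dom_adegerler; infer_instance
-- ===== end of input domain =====

-- B replaces A's O(length) summation loop per exponent by the O(1) Stirling-number
-- closed form  Σ_{i≤n} i^j = Σ_k S2(j,k)·(n+1)·n·…·(n+1-k) // (k+1)  (objective: faster).

-- ===== PORT A =====
def adegerler (length : Int) : List Int :=
  (PySem.List.pyRange 1 13 1).foldl
    (fun atoplam j =>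
      atoplam ++ [(PySem.List.pyRange 0 length 1).foldl (fun sonuc i => sonuc + (i + 1) ^ j.toNat) 0])
    [length]

-- ===== PORT B =====
-- _S2 table of Source B: row j lists (k, S2(j,k)) for k = 1..j
def s2rows : List (List (Nat × Int)) :=
  [[(1, 1)],
   [(1, 1), (2, 1)],
   [(1, 1), (2, 3), (3, 1)],
   [(1, 1), (2, 7), (3, 6), (4, 1)],
   [(1, 1), (2, 15), (3, 25), (4, 10), (5, 1)],
   [(1, 1), (2, 31), (3, 90), (4, 65), (5, 15), (6, 1)],
   [(1, 1), (2, 63), (3, 301), (4, 350), (5, 140), (6, 21), (7, 1)],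
   [(1, 1), (2, 127), (3, 966), (4, 1701), (5, 1050), (6, 266), (7, 28), (8, 1)],
   [(1, 1), (2, 255), (3, 3025), (4, 7770), (5, 6951), (6, 2646), (7, 462), (8, 36), (9, 1)],
   [(1, 1), (2, 511), (3, 9330), (4, 34105), (5, 42525), (6, 22827), (7, 5880), (8, 750), (9, 45), (10, 1)],
   [(1, 1), (2, 1023), (3, 28501), (4, 145750), (5, 246730), (6, 179487), (7, 63987), (8, 11880), (9, 1155), (10, 55), (11, 1)],
   [(1, 1), (2, 2047), (3, 86526), (4, 611501), (5, 1379400), (6, 1323652), (7, 627396), (8, 159027), (9, 22275), (10, 1705), (11, 66), (12, 1)]]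

-- innermost loop of Source B: p = 1; for t in range(c): p *= x - t
def dprod (x : Int) (c : Nat) : Int :=
  (List.range c).foldl (fun p t => p * (x - (t : Int))) 1

-- middle loop of Source B: total = 0; for (k, s) in row: total += s * (dprod(x, k+1) // (k+1))
def rowTotal (x : Int) (row : List (Nat × Int)) : Int :=
  row.foldl (fun total ks => total + ks.2 * PySem.Int.floordiv (dprod x (ks.1 + 1)) ((ks.1 : Int) + 1)) 0

def adegerler_alt (length : Int) : List Int :=
  let n : Int := if length > 0 then length else 0
  length :: s2rows.map (fun row => rowTotal (n + 1) row)

-- ===== PRECONDITION & SPEC =====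
def Spec_adegerler (length : Int) (out : List Int) : Prop := out = adegerler_alt length
instance (length : Int) (out : List Int) : Decidable (Spec_adegerler length out) := by unfold Spec_adegerler; infer_instance

-- ===== CLAIM (what is proved, stated in full; the proofs are below) =====
def Claim_equal_adegerler : Prop := ∀ (length : Int), Dom_adegerler length → Spec_adegerler length (adegerler length)

-- ===== LEMMAS AND PROOFS =====

-- sum computed by A's inner loop, over the first m positive integers
def sumA (j m : Nat) : Int := (List.range m).foldl (fun (s : Int) (i : Nat) => s + ((i : Int) + 1) ^ j) 0

-- Σ over a row of s * dprod x k (the exact per-step increment of rowTotal)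
def polyRow (row : List (Nat × Int)) (x : Int) : Int :=
  (row.map (fun ks => ks.2 * dprod x ks.1)).sum

theorem dprod_succ (x : Int) (c : Nat) : dprod x (c + 1) = dprod x c * (x - c) := by
  simp [dprod, List.range_succ]

theorem dprod_shift (x : Int) (c : Nat) : dprod (x + 1) (c + 1) = (x + 1) * dprod x c := by
  induction c with
  | zero => simp [dprod, List.range_succ]
  | succ c ih =>
      rw [dprod_succ, ih, dprod_succ]
      push_cast
      ring

theorem dprod_diff (x : Int) (k : Nat) :
    dprod (x + 1) (k + 1) = dprod x (k + 1) + ((k : Int) + 1) * dprod x k := by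
  rw [dprod_shift, dprod_succ]
  ring

theorem term_step (x : Int) (k : Nat) :
    PySem.Int.floordiv (dprod (x + 1) (k + 1)) ((k : Int) + 1)
      = PySem.Int.floordiv (dprod x (k + 1)) ((k : Int) + 1) + dprod x k := by
  have hpos : (0 : Int) < (k : Int) + 1 := by positivity
  simp only [PySem.Int.floordiv_eq_ediv_of_pos hpos]
  rw [dprod_diff]
  rw [mul_comm ((k : Int) + 1) (dprod x k)]
  exact Int.add_mul_ediv_right _ _ (by omega)

theorem rowTotal_eq_sum (x : Int) (row : List (Nat × Int)) :
    rowTotal x row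
      = (row.map (fun ks => ks.2 * PySem.Int.floordiv (dprod x (ks.1 + 1)) ((ks.1 : Int) + 1))).sum := by
  unfold rowTotal
  rw [PySem.List.foldl_add]
  simp

theorem rowTotal_step (x : Int) (row : List (Nat × Int)) :
    rowTotal (x + 1) row = rowTotal x row + polyRow row x := by
  rw [rowTotal_eq_sum, rowTotal_eq_sum]
  unfold polyRow
  induction row with
  | nil => simp
  | cons ks rest ih =>
      simp only [List.map_cons, List.sum_cons]
      rw [term_step, ih]
      ring

theorem sumA_step (j m : Nat) : sumA j (m + 1) = sumA j m + ((m : Int) + 1) ^ j := by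
  simp [sumA, List.range_succ]

-- generic bridge: if a row's polynomial is y ↦ y^j and its value at x = 1 is 0,
-- then A's inner loop equals B's rowTotal
theorem main_bridge (row : List (Nat × Int)) (j : Nat)
    (hpoly : ∀ y : Int, polyRow row y = y ^ j)
    (hzero : rowTotal 1 row = 0) :
    ∀ m : Nat, sumA j m = rowTotal ((m : Int) + 1) row := by
  intro m
  induction m with
  | zero => simpa [sumA] using hzero.symm
  | succ m ih =>
      calc sumA j (m + 1) = sumA j m + ((m : Int) + 1) ^ j := sumA_step j m
        _ = rowTotal ((m : Int) + 1) row + polyRow row ((m : Int) + 1) := by rw [ih, hpoly]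
        _ = rowTotal (((m : Int) + 1) + 1) row := (rowTotal_step _ _).symm
        _ = rowTotal (((m + 1 : Nat) : Int) + 1) row := by norm_cast

-- A's result, as a list of the twelve inner sums
theorem adegerler_eq (length : Int) :
    adegerler length
      = length :: (PySem.List.pyRange 1 13 1).map
          (fun j => (PySem.List.pyRange 0 length 1).foldl (fun sonuc i => sonuc + (i + 1) ^ j.toNat) 0) := by
  unfold adegerler
  rw [PySem.List.foldl_append_singleton_eq_map]
  rfl

theorem pyRange_1_13 : PySem.List.pyRange 1 13 1 = [1, 2, 3, 4, 5, 6, 7, 8, 9, 10, 11, 12] := by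
  decide

theorem inner_eq_sumA (length : Int) (h : 0 < length) (j : Nat) :
    (PySem.List.pyRange 0 length 1).foldl (fun sonuc i => sonuc + (i + 1) ^ j) 0
      = sumA j length.toNat := by
  have hl : length = (length.toNat : Int) := by omega
  rw [hl, PySem.List.pyRange_zero_natCast, List.foldl_map, Int.toNat_natCast]
  rfl

theorem rows_zero : s2rows.map (fun row => rowTotal 1 row) =
    [0, 0, 0, 0, 0, 0, 0, 0, 0, 0, 0, 0] := by decide

-- the twelve row-polynomial identities Σ_k S2(j,k)·dprod x k = x^j
theorem poly1 : ∀ y : Int, polyRow [(1, 1)] y = y ^ 1 := by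
  intro y; simp [polyRow, dprod, List.range_succ]; try ring
theorem poly2 : ∀ y : Int, polyRow [(1, 1), (2, 1)] y = y ^ 2 := by
  intro y; simp [polyRow, dprod, List.range_succ]; try ring
theorem poly3 : ∀ y : Int, polyRow [(1, 1), (2, 3), (3, 1)] y = y ^ 3 := by
  intro y; simp [polyRow, dprod, List.range_succ]; try ring
theorem poly4 : ∀ y : Int, polyRow [(1, 1), (2, 7), (3, 6), (4, 1)] y = y ^ 4 := by
  intro y; simp [polyRow, dprod, List.range_succ]; try ring
theorem poly5 : ∀ y : Int, polyRow [(1, 1), (2, 15), (3, 25), (4, 10), (5, 1)] y = y ^ 5 := by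
  intro y; simp [polyRow, dprod, List.range_succ]; try ring
theorem poly6 : ∀ y : Int, polyRow [(1, 1), (2, 31), (3, 90), (4, 65), (5, 15), (6, 1)] y = y ^ 6 := by
  intro y; simp [polyRow, dprod, List.range_succ]; try ring
theorem poly7 : ∀ y : Int, polyRow [(1, 1), (2, 63), (3, 301), (4, 350), (5, 140), (6, 21), (7, 1)] y = y ^ 7 := by
  intro y; simp [polyRow, dprod, List.range_succ]; try ring
theorem poly8 : ∀ y : Int, polyRow [(1, 1), (2, 127), (3, 966), (4, 1701), (5, 1050), (6, 266), (7, 28), (8, 1)] y = y ^ 8 := by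
  intro y; simp [polyRow, dprod, List.range_succ]; try ring
theorem poly9 : ∀ y : Int, polyRow [(1, 1), (2, 255), (3, 3025), (4, 7770), (5, 6951), (6, 2646), (7, 462), (8, 36), (9, 1)] y = y ^ 9 := by
  intro y; simp [polyRow, dprod, List.range_succ]; try ring
theorem poly10 : ∀ y : Int, polyRow [(1, 1), (2, 511), (3, 9330), (4, 34105), (5, 42525), (6, 22827), (7, 5880), (8, 750), (9, 45), (10, 1)] y = y ^ 10 := by
  intro y; simp [polyRow, dprod, List.range_succ]; try ring
theorem poly11 : ∀ y : Int, polyRow [(1, 1), (2, 1023), (3, 28501), (4, 145750), (5, 246730), (6, 179487), (7, 63987), (8, 11880), (9, 1155), (10, 55), (11, 1)] y = y ^ 11 := by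
  intro y; simp [polyRow, dprod, List.range_succ]; try ring
theorem poly12 : ∀ y : Int, polyRow [(1, 1), (2, 2047), (3, 86526), (4, 611501), (5, 1379400), (6, 1323652), (7, 627396), (8, 159027), (9, 22275), (10, 1705), (11, 66), (12, 1)] y = y ^ 12 := by
  intro y; simp [polyRow, dprod, List.range_succ]; try ring

-- ===== VERDICT (by name: the statement is the Claim_ definition above) =====
theorem adegerler_spec : Claim_equal_adegerler := by
  intro length _
  unfold Spec_adegerler adegerler_alt
  rw [adegerler_eq, pyRange_1_13]
  show _ = length :: s2rows.map (fun row => rowTotal ((if length > 0 then length else 0) + 1) row)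
  by_cases h : 0 < length
  · rw [show ((if length > 0 then length else 0) + 1) = (length.toNat : Int) + 1 by
      rw [if_pos h]; omega]
    simp only [s2rows, List.map_cons, List.map_nil, List.cons.injEq, true_and, and_true]
    refine ⟨?_, ?_, ?_, ?_, ?_, ?_, ?_, ?_, ?_, ?_, ?_, ?_⟩ <;>
      first
      | exact (inner_eq_sumA length h 1).trans (main_bridge _ 1 poly1 (by decide) _)
      | exact (inner_eq_sumA length h 2).trans (main_bridge _ 2 poly2 (by decide) _)
      | exact (inner_eq_sumA length h 3).trans (main_bridge _ 3 poly3 (by decide) _)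
      | exact (inner_eq_sumA length h 4).trans (main_bridge _ 4 poly4 (by decide) _)
      | exact (inner_eq_sumA length h 5).trans (main_bridge _ 5 poly5 (by decide) _)
      | exact (inner_eq_sumA length h 6).trans (main_bridge _ 6 poly6 (by decide) _)
      | exact (inner_eq_sumA length h 7).trans (main_bridge _ 7 poly7 (by decide) _)
      | exact (inner_eq_sumA length h 8).trans (main_bridge _ 8 poly8 (by decide) _)
      | exact (inner_eq_sumA length h 9).trans (main_bridge _ 9 poly9 (by decide) _)
      | exact (inner_eq_sumA length h 10).trans (main_bridge _ 10 poly10 (by decide) _)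
      | exact (inner_eq_sumA length h 11).trans (main_bridge _ 11 poly11 (by decide) _)
      | exact (inner_eq_sumA length h 12).trans (main_bridge _ 12 poly12 (by decide) _)
  · have hnil : PySem.List.pyRange 0 length 1 = [] :=
      PySem.List.pyRange_one_eq_nil (by omega)
    rw [if_neg h]
    simp only [hnil, List.foldl_nil]
    rw [show ((0 : Int) + 1) = 1 by ring, rows_zero]
    rfl
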